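-- pv_equiv track=rewrite | github.com/Tagore-7/Leetcode_daily_streak | 790DominoandTrominoTiling.py | numTilings
-- ===== SOURCE A (Python) =====
-- def numTilings(n: int) -> int:
--     F = {0: 1, 1: 1}
--     T = {1: 0}
--     B = {1: 0}
--
--     for i in range(2, n + 1):
--         F[i] = F[i - 1] + F[i - 2] + T[i - 1] + B[i - 1]
--         T[i] = F[i - 2] + B[i - 1]
--         B[i] = F[i - 2] + T[i - 1]
--
--     return F[n] % (10 ** 9 + 7)
-- ===== SOURCE B (Python) =====
-- MOD = 10 ** 9 + 7
--
--
-- def _mat_mul(X, Y):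
--     return tuple(
--         tuple(sum(X[i][k] * Y[k][j] for k in range(3)) % MOD for j in range(3))
--         for i in range(3)
--     )
--
--
-- def _mat_pow(M, e):
--     R = ((1, 0, 0), (0, 1, 0), (0, 0, 1))
--     while e > 0:
--         if e % 2 == 1:
--             R = _mat_mul(R, M)
--         M = _mat_mul(M, M)
--         e //= 2
--     return R
--
--
-- def numTilings(n: int) -> int:
--     if n == 0 or n == 1:
--         return 1
--     if n == 2:
--         return 2
--     P = _mat_pow(((2, 0, 1), (1, 0, 0), (0, 1, 0)), n - 2)
--     return (2 * P[0][0] + P[0][1] + P[0][2]) % MOD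
-- ===== Notes on version B (the rewrite author's own statement) =====
-- stated objective: faster
-- what changed: Replaced the O(n) triple-dict dynamic program (with huge unreduced integers) by binary matrix exponentiation mod 1e9+7 of the linear recurrence f(n)=2f(n-1)+f(n-3); Pre_ excludes n<0, where A raises KeyError.
import Mathlib
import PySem

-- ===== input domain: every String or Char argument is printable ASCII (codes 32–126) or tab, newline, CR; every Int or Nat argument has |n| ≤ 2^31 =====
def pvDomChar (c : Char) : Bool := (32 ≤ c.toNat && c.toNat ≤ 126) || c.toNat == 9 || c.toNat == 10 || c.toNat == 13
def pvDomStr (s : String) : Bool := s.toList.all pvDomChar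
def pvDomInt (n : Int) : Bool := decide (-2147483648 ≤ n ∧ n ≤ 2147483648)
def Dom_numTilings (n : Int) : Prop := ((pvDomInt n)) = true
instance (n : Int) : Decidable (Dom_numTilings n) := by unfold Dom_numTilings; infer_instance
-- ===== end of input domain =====

-- B replaces A's O(n) triple-dict DP by O(log n) modular 3x3 matrix exponentiation of
-- the recurrence f(n) = 2 f(n-1) + f(n-3); equal return value on all n ≥ 0.

-- ===== PORT A =====
-- loop body of A's 'for i in range(2, n+1)'; Python's F[k] lookups are ported as
-- getD _ 0: under Pre_ every looked-up key is present, so the default is never used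
def pvStepA (s : PySem.Dict Int Int × PySem.Dict Int Int × PySem.Dict Int Int) (i : Int) :
    PySem.Dict Int Int × PySem.Dict Int Int × PySem.Dict Int Int :=
  let F := s.1; let T := s.2.1; let B := s.2.2
  let F := F.insert i (F.getD (i-1) 0 + F.getD (i-2) 0 + T.getD (i-1) 0 + B.getD (i-1) 0)
  let T := T.insert i (F.getD (i-2) 0 + B.getD (i-1) 0)
  let B := B.insert i (F.getD (i-2) 0 + T.getD (i-1) 0)
  (F, T, B)

def numTilings (n : Int) : Int :=
  let F : PySem.Dict Int Int := PySem.Dict.ofList [(0,1),(1,1)]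
  let T : PySem.Dict Int Int := PySem.Dict.ofList [(1,0)]
  let B : PySem.Dict Int Int := PySem.Dict.ofList [(1,0)]
  let s := (PySem.List.pyRange 2 (n+1) 1).foldl pvStepA (F, T, B)
  PySem.Int.mod (s.1.getD n 0) (10 ^ 9 + 7)

-- ===== PORT B =====
structure PvMat where
  a : Int
  b : Int
  c : Int
  d : Int
  e : Int
  f : Int
  g : Int
  h : Int
  i : Int
deriving DecidableEq, Repr

def pvMOD : Int := 10 ^ 9 + 7

-- _mat_mul: 3x3 product, every entry reduced mod 1e9+7
def pvMatMul (X Y : PvMat) : PvMat :=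
  ⟨PySem.Int.mod (X.a*Y.a + X.b*Y.d + X.c*Y.g) pvMOD,
   PySem.Int.mod (X.a*Y.b + X.b*Y.e + X.c*Y.h) pvMOD,
   PySem.Int.mod (X.a*Y.c + X.b*Y.f + X.c*Y.i) pvMOD,
   PySem.Int.mod (X.d*Y.a + X.e*Y.d + X.f*Y.g) pvMOD,
   PySem.Int.mod (X.d*Y.b + X.e*Y.e + X.f*Y.h) pvMOD,
   PySem.Int.mod (X.d*Y.c + X.e*Y.f + X.f*Y.i) pvMOD,
   PySem.Int.mod (X.g*Y.a + X.h*Y.d + X.i*Y.g) pvMOD,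
   PySem.Int.mod (X.g*Y.b + X.h*Y.e + X.i*Y.h) pvMOD,
   PySem.Int.mod (X.g*Y.c + X.h*Y.f + X.i*Y.i) pvMOD⟩

-- the 'while e > 0' loop of _mat_pow, on the nonnegative exponent
def pvMatPowLoop (R M : PvMat) (e : Nat) : PvMat :=
  if e = 0 then R
  else pvMatPowLoop (if e % 2 = 1 then pvMatMul R M else R) (pvMatMul M M) (e / 2)
termination_by e
decreasing_by exact Nat.div_lt_self (Nat.pos_of_ne_zero (by assumption)) (by omega)

-- _mat_pow: Python's while-loop never runs for e ≤ 0, which toNat matches exactly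
def pvMatPow (M : PvMat) (e : Int) : PvMat :=
  pvMatPowLoop ⟨1,0,0,0,1,0,0,0,1⟩ M e.toNat

def numTilings_alt (n : Int) : Int :=
  if n = 0 ∨ n = 1 then 1
  else if n = 2 then 2
  else
    let P := pvMatPow ⟨2,0,1,1,0,0,0,1,0⟩ (n - 2)
    PySem.Int.mod (2 * P.a + P.b + P.c) pvMOD

-- ===== PRECONDITION & SPEC =====
-- Pre_ excludes exactly n < 0, on which A raises KeyError (F[n] with negative n is absent)
def Pre_numTilings (n : Int) : Prop := 0 ≤ n
instance (n : Int) : Decidable (Pre_numTilings n) := by unfold Pre_numTilings; infer_instance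
def pvWitness_numTilings : Int := (5)

def Spec_numTilings (n : Int) (out : Int) : Prop := out = numTilings_alt n
instance (n : Int) (out : Int) : Decidable (Spec_numTilings n out) := by unfold Spec_numTilings; infer_instance

-- ===== CLAIM (what is proved, stated in full; the proofs are below) =====
def Claim_equal_numTilings : Prop := ∀ (n : Int), Dom_numTilings n → Pre_numTilings n → Spec_numTilings n (numTilings n)

-- ===== LEMMAS AND PROOFS =====

-- the exact (unreduced) mutual recurrence computed by A: (F_k, T_k, B_k)
def pvFTB : Nat → Int × Int × Int
  | 0 => (1, 0, 0)
  | 1 => (1, 0, 0)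
  | (k+2) =>
      let p := pvFTB (k+1)
      let q := pvFTB k
      (p.1 + q.1 + p.2.1 + p.2.2, q.1 + p.2.2, q.1 + p.2.1)

def pvF (k : Nat) : Int := (pvFTB k).1

theorem pvF_rec (k : Nat) : pvF (k+3) = 2 * pvF (k+2) + pvF k := by
  show (pvFTB ((k+1)+2)).1 = 2 * (pvFTB (k+2)).1 + (pvFTB k).1
  rw [pvFTB, pvFTB]
  ring

-- ----- A side: the fold state after processing i = 2, …, m+1 -----
def pvInitA : PySem.Dict Int Int × PySem.Dict Int Int × PySem.Dict Int Int :=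
  (PySem.Dict.ofList [(0,1),(1,1)], PySem.Dict.ofList [(1,0)], PySem.Dict.ofList [(1,0)])

def pvSA (m : Nat) : PySem.Dict Int Int × PySem.Dict Int Int × PySem.Dict Int Int :=
  (PySem.List.pyRange 2 ((m:Int)+2) 1).foldl pvStepA pvInitA

theorem pvSA_zero : pvSA 0 = pvInitA := by
  unfold pvSA
  rw [show ((0:Nat):Int)+2 = 2 by norm_num, PySem.List.pyRange_one_eq_nil (by omega)]
  rfl

theorem pvSA_succ (k : Nat) : pvSA (k+1) = pvStepA (pvSA k) ((k:Int)+2) := by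
  unfold pvSA
  rw [show ((k+1:Nat):Int)+2 = (((k:Int)+2))+1 by omega,
      PySem.List.pyRange_one_succ_right (by omega), List.foldl_append]
  rfl

theorem pvA_inv (k : Nat) :
    (∀ j : Nat, j ≤ k+1 → (pvSA k).1.getD (j:Int) 0 = pvF j) ∧
    (∀ j : Nat, 1 ≤ j → j ≤ k+1 →
      (pvSA k).2.1.getD (j:Int) 0 = (pvFTB j).2.1 ∧
      (pvSA k).2.2.getD (j:Int) 0 = (pvFTB j).2.2) := by
  induction k with
  | zero =>
      rw [pvSA_zero]
      constructor
      · intro j hj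
        interval_cases j <;> decide
      · intro j h1 h2
        interval_cases j
        exact ⟨by decide, by decide⟩
  | succ k ih =>
      obtain ⟨ihF, ihTB⟩ := ih
      rw [pvSA_succ]
      have e1 : ((k:Int)+2) - 1 = ((k+1:Nat):Int) := by omega
      have e2 : ((k:Int)+2) - 2 = ((k:Nat):Int) := by omega
      have hv1 : (pvSA k).1.getD (((k:Int)+2)-1) 0 = pvF (k+1) := by
        rw [e1]; exact ihF (k+1) (by omega)
      have hv2 : (pvSA k).1.getD (((k:Int)+2)-2) 0 = pvF k := by
        rw [e2]; exact ihF k (by omega)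
      have hv3 : (pvSA k).2.1.getD (((k:Int)+2)-1) 0 = (pvFTB (k+1)).2.1 := by
        rw [e1]; exact (ihTB (k+1) (by omega) (by omega)).1
      have hv4 : (pvSA k).2.2.getD (((k:Int)+2)-1) 0 = (pvFTB (k+1)).2.2 := by
        rw [e1]; exact (ihTB (k+1) (by omega) (by omega)).2
      simp only [pvStepA]
      rw [hv1, hv2, hv3, hv4]
      rw [PySem.Dict.getD_insert_of_ne _ _ _ (show ((k:Int)+2)-2 ≠ (k:Int)+2 by omega), hv2]
      rw [PySem.Dict.getD_insert_of_ne _ _ _ (show ((k:Int)+2)-1 ≠ (k:Int)+2 by omega), hv3]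
      have hFval : pvF (k+1) + pvF k + (pvFTB (k+1)).2.1 + (pvFTB (k+1)).2.2 = pvF (k+2) := by
        simp [pvF, pvFTB]
      have hTval : pvF k + (pvFTB (k+1)).2.2 = (pvFTB (k+2)).2.1 := by
        simp [pvF, pvFTB]
      have hBval : pvF k + (pvFTB (k+1)).2.1 = (pvFTB (k+2)).2.2 := by
        simp [pvF, pvFTB]
      constructor
      · intro j hj
        by_cases hje : j = k+2
        · subst hje
          rw [show ((k+2:Nat):Int) = (k:Int)+2 by omega]
          rw [PySem.Dict.getD_insert_self, hFval]
        · rw [PySem.Dict.getD_insert_of_ne _ _ _ (show ((j:Nat):Int) ≠ (k:Int)+2 by omega)]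
          exact ihF j (by omega)
      · intro j h1 h2
        by_cases hje : j = k+2
        · subst hje
          rw [show ((k+2:Nat):Int) = (k:Int)+2 by omega]
          rw [PySem.Dict.getD_insert_self, PySem.Dict.getD_insert_self]
          exact ⟨hTval, hBval⟩
        · rw [PySem.Dict.getD_insert_of_ne _ _ _ (show ((j:Nat):Int) ≠ (k:Int)+2 by omega),
              PySem.Dict.getD_insert_of_ne _ _ _ (show ((j:Nat):Int) ≠ (k:Int)+2 by omega)]
          exact ihTB j h1 (by omega)

theorem pvA_eq (n : Int) (hn : 0 ≤ n) :
    numTilings n = PySem.Int.mod (pvF n.toNat) pvMOD := by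
  by_cases h1 : 1 ≤ n
  · have hS : numTilings n = PySem.Int.mod ((pvSA (n.toNat-1)).1.getD n 0) pvMOD := by
      simp only [numTilings, pvSA, pvInitA, pvMOD]
      rw [show n + 1 = ((n.toNat-1 : Nat) : Int) + 2 by omega]
    have hinv := (pvA_inv (n.toNat-1)).1 n.toNat (by omega)
    rw [show ((n.toNat : Nat) : Int) = n by omega] at hinv
    rw [hS, hinv]
  · have h0 : n = 0 := by omega
    subst h0
    decide

-- ----- B side: exact matrix algebra and binary-exponentiation correctness mod 1e9+7 -----
def pvI : PvMat := ⟨1,0,0,0,1,0,0,0,1⟩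

def pvMulE (X Y : PvMat) : PvMat :=
  ⟨X.a*Y.a + X.b*Y.d + X.c*Y.g, X.a*Y.b + X.b*Y.e + X.c*Y.h, X.a*Y.c + X.b*Y.f + X.c*Y.i,
   X.d*Y.a + X.e*Y.d + X.f*Y.g, X.d*Y.b + X.e*Y.e + X.f*Y.h, X.d*Y.c + X.e*Y.f + X.f*Y.i,
   X.g*Y.a + X.h*Y.d + X.i*Y.g, X.g*Y.b + X.h*Y.e + X.i*Y.h, X.g*Y.c + X.h*Y.f + X.i*Y.i⟩

def pvRed (X : PvMat) : PvMat :=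
  ⟨X.a % pvMOD, X.b % pvMOD, X.c % pvMOD, X.d % pvMOD, X.e % pvMOD,
   X.f % pvMOD, X.g % pvMOD, X.h % pvMOD, X.i % pvMOD⟩

def pvPowE (M : PvMat) : Nat → PvMat
  | 0 => pvI
  | (k+1) => pvMulE (pvPowE M k) M

theorem pvRed_red (X : PvMat) : pvRed (pvRed X) = pvRed X := by
  simp [pvRed]

theorem pvScong {p a a' b b' c c' d d' e e' f f' : Int}
    (ha : a % p = a' % p) (hb : b % p = b' % p) (hc : c % p = c' % p)
    (hd : d % p = d' % p) (he : e % p = e' % p) (hf : f % p = f' % p) :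
    (a*d + b*e + c*f) % p = (a'*d' + b'*e' + c'*f') % p :=
  ((Int.ModEq.mul ha hd).add ((Int.ModEq.mul hb he))).add (Int.ModEq.mul hc hf)

theorem pvMulE_congr {X X' Y Y' : PvMat} (hX : pvRed X = pvRed X') (hY : pvRed Y = pvRed Y') :
    pvRed (pvMulE X Y) = pvRed (pvMulE X' Y') := by
  simp only [pvRed, PvMat.mk.injEq] at hX hY ⊢
  obtain ⟨h1,h2,h3,h4,h5,h6,h7,h8,h9⟩ := hX
  obtain ⟨g1,g2,g3,g4,g5,g6,g7,g8,g9⟩ := hY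
  simp only [pvMulE]
  and_intros <;> apply pvScong <;> assumption

theorem pvMulE_assoc (X Y Z : PvMat) : pvMulE (pvMulE X Y) Z = pvMulE X (pvMulE Y Z) := by
  simp [pvMulE, PvMat.mk.injEq]; and_intros <;> ring

theorem pvMulE_I_right (X : PvMat) : pvMulE X pvI = X := by
  simp [pvMulE, pvI]

theorem pvMulE_I_left (X : PvMat) : pvMulE pvI X = X := by
  simp [pvMulE, pvI]

theorem pvPowE_congr {M N : PvMat} (h : pvRed M = pvRed N) (k : Nat) :
    pvRed (pvPowE M k) = pvRed (pvPowE N k) := by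
  induction k with
  | zero => rfl
  | succ k ih => exact pvMulE_congr ih h

theorem pvPowE_comm (M : PvMat) (k : Nat) :
    pvMulE (pvPowE M k) M = pvMulE M (pvPowE M k) := by
  induction k with
  | zero => rw [pvPowE, pvMulE_I_left, pvMulE_I_right]
  | succ k ih => rw [pvPowE, ih, pvMulE_assoc, ih]

theorem pvPowE_sq (M : PvMat) (k : Nat) : pvPowE (pvMulE M M) k = pvPowE M (2*k) := by
  induction k with
  | zero => rfl
  | succ k ih =>
      rw [pvPowE, ih, show 2*(k+1) = 2*k+1+1 from rfl, pvPowE, pvPowE, pvMulE_assoc]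

theorem pvMatMul_eq (X Y : PvMat) : pvMatMul X Y = pvRed (pvMulE X Y) := by
  have hm : ∀ a : Int, PySem.Int.mod a pvMOD = a % pvMOD :=
    fun a => PySem.Int.mod_eq_emod_of_pos (by norm_num [pvMOD])
  simp [pvMatMul, pvMulE, pvRed, hm]

theorem pvLoop_spec (e : Nat) (R M : PvMat) :
    pvRed (pvMatPowLoop R M e) = pvRed (pvMulE R (pvPowE M e)) := by
  induction e using Nat.strong_induction_on generalizing R M with
  | _ e ih =>
    by_cases h0 : e = 0
    · subst h0
      rw [pvMatPowLoop]
      simp [pvMulE_I_right, pvPowE]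
    · rw [pvMatPowLoop, if_neg h0]
      rw [ih (e/2) (Nat.div_lt_self (Nat.pos_of_ne_zero h0) (by omega))]
      have hMM : pvRed (pvMatMul M M) = pvRed (pvMulE M M) := by
        rw [pvMatMul_eq, pvRed_red]
      have hpow : pvRed (pvPowE (pvMatMul M M) (e/2)) = pvRed (pvPowE M (2*(e/2))) := by
        rw [pvPowE_congr hMM, pvPowE_sq]
      by_cases hodd : e % 2 = 1
      · rw [if_pos hodd]
        have h1 : pvRed (pvMatMul R M) = pvRed (pvMulE R M) := by rw [pvMatMul_eq, pvRed_red]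
        rw [pvMulE_congr h1 hpow]
        have he : e = 2*(e/2)+1 := by omega
        have hx : pvMulE (pvMulE R M) (pvPowE M (2*(e/2))) = pvMulE R (pvPowE M e) := by
          conv_rhs => rw [he]
          rw [show pvPowE M (2*(e/2)+1) = pvMulE (pvPowE M (2*(e/2))) M from rfl,
              pvMulE_assoc, ← pvPowE_comm]
        rw [hx]
      · rw [if_neg hodd]
        rw [pvMulE_congr rfl hpow]
        have he : 2*(e/2) = e := by omega
        rw [he]

def pvM0 : PvMat := ⟨2,0,1,1,0,0,0,1,0⟩

def pvMulV (X : PvMat) (v : Int × Int × Int) : Int × Int × Int :=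
  (X.a*v.1 + X.b*v.2.1 + X.c*v.2.2,
   X.d*v.1 + X.e*v.2.1 + X.f*v.2.2,
   X.g*v.1 + X.h*v.2.1 + X.i*v.2.2)

theorem pvMulV_mulE (X Y : PvMat) (v : Int × Int × Int) :
    pvMulV (pvMulE X Y) v = pvMulV X (pvMulV Y v) := by
  simp [pvMulV, pvMulE, Prod.ext_iff]; and_intros <;> ring

theorem pvPow_vec (k m : Nat) :
    pvMulV (pvPowE pvM0 k) (pvF (m+2), pvF (m+1), pvF m) = (pvF (m+k+2), pvF (m+k+1), pvF (m+k)) := by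
  induction k generalizing m with
  | zero => simp [pvPowE, pvI, pvMulV]
  | succ k ih =>
      rw [pvPowE, pvMulV_mulE]
      have hstep : pvMulV pvM0 (pvF (m+2), pvF (m+1), pvF m) = (pvF (m+1+2), pvF (m+1+1), pvF (m+1)) := by
        simp [pvMulV, pvM0]
        rw [show m+1+2 = m+3 from rfl, pvF_rec]
      rw [hstep, ih (m+1)]
      have h1 : m+1+k = m+(k+1) := by omega
      rw [h1]

theorem pvB_eq (n : Int) (hn : 3 ≤ n) :
    numTilings_alt n = PySem.Int.mod (pvF n.toNat) pvMOD := by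
  have hm : ∀ a : Int, PySem.Int.mod a pvMOD = a % pvMOD :=
    fun a => PySem.Int.mod_eq_emod_of_pos (by norm_num [pvMOD])
  have h0 : ¬(n = 0 ∨ n = 1) := by omega
  have h2 : ¬(n = 2) := by omega
  simp only [numTilings_alt, if_neg h0, if_neg h2, hm]
  have hQ : pvRed (pvMatPow pvM0 (n-2)) = pvRed (pvPowE pvM0 (n-2).toNat) := by
    rw [pvMatPow, pvLoop_spec, show (⟨1,0,0,0,1,0,0,0,1⟩ : PvMat) = pvI from rfl, pvMulE_I_left]
  have ha : (pvMatPow pvM0 (n-2)).a % pvMOD = (pvPowE pvM0 (n-2).toNat).a % pvMOD :=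
    congrArg PvMat.a hQ
  have hb : (pvMatPow pvM0 (n-2)).b % pvMOD = (pvPowE pvM0 (n-2).toNat).b % pvMOD :=
    congrArg PvMat.b hQ
  have hc : (pvMatPow pvM0 (n-2)).c % pvMOD = (pvPowE pvM0 (n-2).toNat).c % pvMOD :=
    congrArg PvMat.c hQ
  have h1 := congrArg Prod.fst (pvPow_vec (n-2).toNat 0)
  simp only [pvMulV, show pvF 2 = 2 from rfl, show pvF 1 = 1 from rfl, show pvF 0 = 1 from rfl,
    Nat.zero_add] at h1
  have hval : 2 * (pvPowE pvM0 (n-2).toNat).a + (pvPowE pvM0 (n-2).toNat).b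
      + (pvPowE pvM0 (n-2).toNat).c = pvF ((n-2).toNat + 2) := by
    rw [← h1]; ring
  calc (2 * (pvMatPow pvM0 (n-2)).a + (pvMatPow pvM0 (n-2)).b + (pvMatPow pvM0 (n-2)).c) % pvMOD
      = (2 * (pvPowE pvM0 (n-2).toNat).a + (pvPowE pvM0 (n-2).toNat).b
          + (pvPowE pvM0 (n-2).toNat).c) % pvMOD :=
        ((Int.ModEq.mul_left 2 ha).add hb).add hc
    _ = pvF n.toNat % pvMOD := by rw [hval, show (n-2).toNat + 2 = n.toNat by omega]

-- ===== VERDICT (by name: the statement is the Claim_ definition above) =====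
theorem numTilings_spec : Claim_equal_numTilings := by
  intro n _ hpre
  have hn : 0 ≤ n := hpre
  unfold Spec_numTilings
  by_cases h3 : 3 ≤ n
  · rw [pvA_eq n hn, pvB_eq n h3]
  · have : n = 0 ∨ n = 1 ∨ n = 2 := by omega
    rcases this with h | h | h <;> subst h <;> decide
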